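-- pv_equiv track=rewrite | github.com/gabrielbessler/ProgrammingCompetition | WC34_2.py | maximumGcdAndSum
-- ===== SOURCE A (Python) =====
-- def maximumGcdAndSum(A, B):
--
--     #We know that we cannot have a GCD higher than the maximum of a set
--     maxA, maxB = max(A), max(B)
--     maximum_possible_factor = min(maxA, maxB)
--     highest_val = max(maxA, maxB)
--
--     A = set(A)
--     B = set(B)
--
--     #We are going to start with the highest possible GCD and work our way down
--     for possible_gcd in range(maximum_possible_factor, 0, -1):
--
--         #For this given GCD to be our answer, it has to have a multiple in A and a multiple in B
--         x = possible_gcd * (highest_val // possible_gcd)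
--         fnum = 0
--         snum = 0
--         while x >= 1 :
--             if fnum == 0:
--                 if x in A:
--                     fnum = x
--             if snum == 0:
--                 if x in B:
--                     snum = x
--             #We are going through each possible multiple of the GCD that will fit in the set
--             x -= possible_gcd
--
--         if fnum != 0 and snum != 0:
--             return (fnum + snum)
-- ===== SOURCE B (Python) =====
-- def maximumGcdAndSum(A, B):
--     # Max gcd over (positive a in A, positive b in B) pairs, scanning B's positives
--     # in descending order so the inner loop can stop once b <= best (gcd(a,b) <= b),
--     # and skipping a <= best (gcd(a,b) <= a); then sum the largest multiples.
--     def gcd(a, b):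
--         while b > 0:
--             a, b = b, a % b
--         return a
--
--     Bs = sorted([b for b in B if b >= 1], reverse=True)
--     best = 0
--     for a in A:
--         if best < a:
--             for b in Bs:
--                 if b <= best:
--                     break
--                 g = gcd(a, b)
--                 if best < g:
--                     best = g
--     if best == 0:
--         return None
--     fa = max(x for x in A if x >= 1 and x % best == 0)
--     fb = max(x for x in B if x >= 1 and x % best == 0)
--     return fa + fb
-- ===== Notes on version B (the rewrite author's own statement) =====
-- stated objective: alternative
-- what changed: Replaces A's countdown over all candidate gcd values (inner scan over every multiple up to the maximum, set lookups) by a pairwise-gcd maximum — B's positives sorted descending so the inner loop breaks once b <= best and elements a <= best are skipped — followed by one filtered max per list; Pre_ excludes empty lists (A raises ValueError) and lists with no positive element (A falls off its loop and returns None, not an int).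
-- outside the precondition, e.g. on maximumGcdAndSum([-1, -5], [3]): A returns None, B returns None
import Mathlib
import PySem

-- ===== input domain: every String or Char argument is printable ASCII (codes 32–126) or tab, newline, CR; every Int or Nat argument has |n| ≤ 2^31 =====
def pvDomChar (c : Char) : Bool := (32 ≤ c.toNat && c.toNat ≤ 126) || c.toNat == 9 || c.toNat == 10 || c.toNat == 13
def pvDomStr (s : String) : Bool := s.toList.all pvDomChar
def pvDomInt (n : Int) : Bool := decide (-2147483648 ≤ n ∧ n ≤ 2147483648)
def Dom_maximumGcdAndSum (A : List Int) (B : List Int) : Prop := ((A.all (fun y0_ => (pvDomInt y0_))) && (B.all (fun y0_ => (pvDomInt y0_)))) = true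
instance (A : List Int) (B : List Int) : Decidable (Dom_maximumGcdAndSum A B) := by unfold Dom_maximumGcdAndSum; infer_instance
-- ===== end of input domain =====

-- B replaces A's countdown over candidate gcd values (with an inner scan over all
-- multiples up to the maximum) by a max-of-pairwise-gcds pass plus one filtered max
-- per list; equivalence is proved on Pre_ (each list holds some positive element).

-- ===== PORT A =====
-- the 'while x >= 1' loop (1 ≤ g added only as a totality guard; the caller always has 1 ≤ g)
def pvWhile (As Bs : List Int) (g x fnum snum : Int) : Int × Int :=
  if h : 1 ≤ x ∧ 1 ≤ g then
    let fnum' := if fnum = 0 then (if As.contains x then x else fnum) else fnum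
    let snum' := if snum = 0 then (if Bs.contains x then x else snum) else snum
    pvWhile As Bs g (x - g) fnum' snum'
  else (fnum, snum)
termination_by x.toNat
decreasing_by omega

-- the 'for possible_gcd in range(...)' loop; falling off the loop returns None, modelled as 0 (outside Pre_)
def pvOuter (As Bs : List Int) (hv : Int) : List Int → Int
  | [] => 0
  | g :: rest =>
    let x := g * PySem.Int.floordiv hv g
    let p := pvWhile As Bs g x 0 0
    if p.1 ≠ 0 ∧ p.2 ≠ 0 then p.1 + p.2 else pvOuter As Bs hv rest

def maximumGcdAndSum (A : List Int) (B : List Int) : Int :=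
  let maxA := (PySem.List.max? A (fun y => y)).getD 0
  let maxB := (PySem.List.max? B (fun y => y)).getD 0
  let m := min maxA maxB
  let hv := max maxA maxB
  let As := PySem.Set.ofList A
  let Bs := PySem.Set.ofList B
  pvOuter As Bs hv (PySem.List.pyRange m 0 (-1))

-- ===== PORT B =====
-- hand-written Euclid from Source B (guard 1 ≤ b is Source B's 'while b > 0')
def pvGcd (a b : Int) : Int :=
  if h : 1 ≤ b then pvGcd b (PySem.Int.mod a b) else a
termination_by b.toNat
decreasing_by
  have h1 := PySem.Int.mod_nonneg a (b := b) (by omega)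
  have h2 := PySem.Int.mod_lt a (b := b) (by omega)
  omega

def pvInner (a : Int) : List Int → Int → Int
  | [], best => best
  | b :: t, best =>
    if b ≤ best then best
    else pvInner a t (if best < pvGcd a b then pvGcd a b else best)

def pvOuterF (Bs : List Int) (best a : Int) : Int :=
  if best < a then pvInner a Bs best else best

def pvBest (A Bs : List Int) : Int := A.foldl (pvOuterF Bs) 0

def pvTopMul (S : List Int) (best : Int) : Int :=
  (PySem.List.max? (S.filter (fun x => decide (1 ≤ x) && decide (PySem.Int.mod x best = 0)))
    (fun y => y)).getD 0

def maximumGcdAndSum_alt (A : List Int) (B : List Int) : Int :=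
  let Bs := PySem.List.sorted (B.filter (fun b => decide (1 ≤ b))) (fun x => x) true
  let best := pvBest A Bs
  if best = 0 then 0   -- Source B returns None here; outside Pre_
  else pvTopMul A best + pvTopMul B best

-- ===== PRECONDITION & SPEC =====
-- Pre_ excludes empty lists (Python A raises ValueError on max([])) and lists whose
-- maximum is ≤ 0 (A's for-loop range is empty, A returns None, which is not an Int).
def Pre_maximumGcdAndSum (A : List Int) (B : List Int) : Prop :=
  (∃ a ∈ A, 1 ≤ a) ∧ (∃ b ∈ B, 1 ≤ b)
instance (A : List Int) (B : List Int) : Decidable (Pre_maximumGcdAndSum A B) := by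
  unfold Pre_maximumGcdAndSum; infer_instance

def pvWitness_maximumGcdAndSum : List Int × List Int := ([2, 4], [6, 3])

def Spec_maximumGcdAndSum (A : List Int) (B : List Int) (out : Int) : Prop := out = maximumGcdAndSum_alt A B
instance (A : List Int) (B : List Int) (out : Int) : Decidable (Spec_maximumGcdAndSum A B out) := by unfold Spec_maximumGcdAndSum; infer_instance

-- ===== CLAIM (what is proved, stated in full; the proofs are below) =====
def Claim_equal_maximumGcdAndSum : Prop := ∀ (A : List Int) (B : List Int), Dom_maximumGcdAndSum A B → Pre_maximumGcdAndSum A B → Spec_maximumGcdAndSum A B (maximumGcdAndSum A B)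

-- ===== LEMMAS AND PROOFS =====

-- a qualifies as a hit for gcd candidate g in list S, scanning down from x
def Qual (S : List Int) (g x a : Int) : Prop := a ∈ S ∧ 1 ≤ a ∧ a ≤ x ∧ g ∣ a

-- v is the value A's while loop leaves in fnum/snum: 0 if nothing qualifies, else the largest hit
def IsHit (S : List Int) (g x v : Int) : Prop :=
  (v = 0 ∧ ∀ a, ¬ Qual S g x a) ∨ (Qual S g x v ∧ ∀ a, Qual S g x a → a ≤ v)

lemma isHit_unique {S : List Int} {g x v w : Int}
    (hv : IsHit S g x v) (hw : IsHit S g x w) : v = w := by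
  rcases hv with ⟨hv0, hvn⟩ | ⟨hvq, hvu⟩ <;> rcases hw with ⟨hw0, hwn⟩ | ⟨hwq, hwu⟩
  · omega
  · exact absurd hwq (hvn w)
  · exact absurd hvq (hwn v)
  · have := hvu w hwq; have := hwu v hvq; omega

lemma isHit_congr {S T : List Int} {g x v : Int}
    (hmem : ∀ a, a ∈ S ↔ a ∈ T) (h : IsHit S g x v) : IsHit T g x v := by
  unfold IsHit Qual at *
  simp only [hmem] at h ⊢
  exact h

lemma qual_shift {S : List Int} {g x a : Int} (hg : 1 ≤ g) (hx : g ∣ x)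
    (hnot : x ∉ S) : Qual S g x a ↔ Qual S g (x - g) a := by
  unfold Qual
  constructor
  · rintro ⟨h1, h2, h3, h4⟩
    refine ⟨h1, h2, ?_, h4⟩
    have hne : a ≠ x := by rintro rfl; exact hnot h1
    have hlt : a < x := lt_of_le_of_ne h3 hne
    have : g ∣ (x - a) := dvd_sub hx h4
    rcases this with ⟨k, hk⟩
    have hk1 : 1 ≤ k := by
      by_contra hknot
      have hk0 : g * k ≤ 0 := mul_nonpos_of_nonneg_of_nonpos (by omega) (by omega)
      omega
    nlinarith [mul_nonneg (by omega : (0:ℤ) ≤ k - 1) (by omega : (0:ℤ) ≤ g)]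
  · rintro ⟨h1, h2, h3, h4⟩
    exact ⟨h1, h2, by omega, h4⟩

lemma isHit_shift {S : List Int} {g x v : Int} (hg : 1 ≤ g) (hx : g ∣ x)
    (hnot : x ∉ S) : IsHit S g (x - g) v ↔ IsHit S g x v := by
  unfold IsHit
  simp only [qual_shift hg hx hnot]

lemma while_spec (As Bs : List Int) (g : Int) (hg : 1 ≤ g) :
    ∀ (n : Nat) (x : Int), x.toNat ≤ n → g ∣ x → ∀ f s,
      ((f = 0 → IsHit As g x (pvWhile As Bs g x f s).1) ∧
        (f ≠ 0 → (pvWhile As Bs g x f s).1 = f)) ∧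
      ((s = 0 → IsHit Bs g x (pvWhile As Bs g x f s).2) ∧
        (s ≠ 0 → (pvWhile As Bs g x f s).2 = s)) := by
  have noQual : ∀ (S : List Int) (x : Int), ¬ 1 ≤ x → ∀ a, ¬ Qual S g x a := by
    rintro S x hx a ⟨_, h2, h3, _⟩; omega
  have hitTop : ∀ (S : List Int) (x : Int), x ∈ S → 1 ≤ x → g ∣ x → IsHit S g x x := by
    rintro S x hmem hx hdvd
    exact Or.inr ⟨⟨hmem, hx, le_refl _, hdvd⟩, fun a ha => ha.2.2.1⟩
  intro n
  induction n with
  | zero =>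
    intro x hxn hdvd f s
    have hx : ¬ (1 ≤ x) := by omega
    rw [pvWhile]
    rw [dif_neg (by omega : ¬ (1 ≤ x ∧ 1 ≤ g))]
    exact ⟨⟨fun hf => Or.inl ⟨hf, noQual As x hx⟩, fun _ => rfl⟩,
           ⟨fun hs => Or.inl ⟨hs, noQual Bs x hx⟩, fun _ => rfl⟩⟩
  | succ n ih =>
    intro x hxn hdvd f s
    by_cases hx : 1 ≤ x
    · have key : pvWhile As Bs g x f s = pvWhile As Bs g (x - g)
          (if f = 0 then (if As.contains x = true then x else f) else f)
          (if s = 0 then (if Bs.contains x = true then x else s) else s) := by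
        rw [pvWhile, dif_pos ⟨hx, hg⟩]
      rw [key]
      have hdvd' : g ∣ x - g := dvd_sub hdvd dvd_rfl
      obtain ⟨⟨ihA0, ihAn⟩, ihB0, ihBn⟩ := ih (x - g) (by omega) hdvd'
          (if f = 0 then (if As.contains x = true then x else f) else f)
          (if s = 0 then (if Bs.contains x = true then x else s) else s)
      refine ⟨⟨fun hf => ?_, fun hf => ?_⟩, ⟨fun hs => ?_, fun hs => ?_⟩⟩
      · by_cases hc : As.contains x = true
        · have hfx : (if f = 0 then (if As.contains x = true then x else f) else f) = x := by
            rw [if_pos hf, if_pos hc]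
          rw [ihAn (by rw [hfx]; omega), hfx]
          exact hitTop As x (List.contains_iff_mem.1 hc) hx hdvd
        · have hnot : x ∉ As := fun hmem => hc (List.contains_iff_mem.2 hmem)
          have hf0 : (if f = 0 then (if As.contains x = true then x else f) else f) = 0 := by
            rw [if_pos hf, if_neg hc, hf]
          exact (isHit_shift hg hdvd hnot).1 (ihA0 hf0)
      · have hfe : (if f = 0 then (if As.contains x = true then x else f) else f) = f :=
          if_neg hf
        rw [ihAn (by rw [hfe]; exact hf), hfe]
      · by_cases hc : Bs.contains x = true
        · have hsx : (if s = 0 then (if Bs.contains x = true then x else s) else s) = x := by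
            rw [if_pos hs, if_pos hc]
          rw [ihBn (by rw [hsx]; omega), hsx]
          exact hitTop Bs x (List.contains_iff_mem.1 hc) hx hdvd
        · have hnot : x ∉ Bs := fun hmem => hc (List.contains_iff_mem.2 hmem)
          have hs0 : (if s = 0 then (if Bs.contains x = true then x else s) else s) = 0 := by
            rw [if_pos hs, if_neg hc, hs]
          exact (isHit_shift hg hdvd hnot).1 (ihB0 hs0)
      · have hse : (if s = 0 then (if Bs.contains x = true then x else s) else s) = s :=
          if_neg hs
        rw [ihBn (by rw [hse]; exact hs), hse]
    · rw [pvWhile, dif_neg (by omega : ¬ (1 ≤ x ∧ 1 ≤ g))]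
      exact ⟨⟨fun hf => Or.inl ⟨hf, noQual As x hx⟩, fun _ => rfl⟩,
             ⟨fun hs => Or.inl ⟨hs, noQual Bs x hx⟩, fun _ => rfl⟩⟩

-- pvGcd facts (all for the nonnegative arguments Source B reaches)
lemma pvGcd_pos : ∀ (n : Nat) (b a : Int), b.toNat ≤ n → 1 ≤ a → 0 ≤ b → 1 ≤ pvGcd a b := by
  intro n
  induction n with
  | zero =>
    intro b a hbn ha hb
    rw [pvGcd, dif_neg (by omega : ¬ (1 ≤ b))]; exact ha
  | succ n ih =>
    intro b a hbn ha hb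
    by_cases hb1 : 1 ≤ b
    · rw [pvGcd, dif_pos hb1]
      have h1 := PySem.Int.mod_nonneg a (b := b) (by omega)
      have h2 := PySem.Int.mod_lt a (b := b) (by omega)
      exact ih (PySem.Int.mod a b) b (by omega) hb1 h1
    · rw [pvGcd, dif_neg hb1]; exact ha

lemma pvGcd_dvd : ∀ (n : Nat) (b a : Int), b.toNat ≤ n → 0 ≤ b → pvGcd a b ∣ a ∧ pvGcd a b ∣ b := by
  intro n
  induction n with
  | zero =>
    intro b a hbn hb
    have hb0 : b = 0 := by omega
    subst hb0
    rw [pvGcd, dif_neg (by omega : ¬ ((1:Int) ≤ 0))]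
    exact ⟨dvd_rfl, dvd_zero a⟩
  | succ n ih =>
    intro b a hbn hb
    by_cases hb1 : 1 ≤ b
    · rw [pvGcd, dif_pos hb1]
      have h1 := PySem.Int.mod_nonneg a (b := b) (by omega)
      have h2 := PySem.Int.mod_lt a (b := b) (by omega)
      obtain ⟨d1, d2⟩ := ih (PySem.Int.mod a b) b (by omega) h1
      refine ⟨?_, d1⟩
      have heq := PySem.Int.floordiv_mul_add_mod a b
      have hsum : pvGcd b (PySem.Int.mod a b) ∣
          (PySem.Int.floordiv a b * b + PySem.Int.mod a b) := dvd_add (d1.mul_left _) d2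
      rwa [heq] at hsum
    · have hb0 : b = 0 := by omega
      subst hb0
      rw [pvGcd, dif_neg hb1]
      exact ⟨dvd_rfl, dvd_zero a⟩

lemma dvd_pvGcd : ∀ (n : Nat) (b a d : Int), b.toNat ≤ n → d ∣ a → d ∣ b → d ∣ pvGcd a b := by
  intro n
  induction n with
  | zero =>
    intro b a d hbn hda hdb
    rw [pvGcd]
    split_ifs with hb1
    · omega
    · exact hda
  | succ n ih =>
    intro b a d hbn hda hdb
    by_cases hb1 : 1 ≤ b
    · rw [pvGcd, dif_pos hb1]
      have h1 := PySem.Int.mod_nonneg a (b := b) (by omega)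
      have h2 := PySem.Int.mod_lt a (b := b) (by omega)
      have hdm : d ∣ PySem.Int.mod a b := by
        have heq := PySem.Int.floordiv_mul_add_mod a b
        have : PySem.Int.mod a b = a - PySem.Int.floordiv a b * b := by omega
        rw [this]
        exact dvd_sub hda (hdb.mul_left _)
      exact ih (PySem.Int.mod a b) b d (by omega) hdb hdm
    · rw [pvGcd, dif_neg hb1]; exact hda

-- pvGcd is bounded by each positive argument
lemma pvGcd_le_right {a b : Int} (hb : 1 ≤ b) : pvGcd a b ≤ b :=
  Int.le_of_dvd (by omega) (pvGcd_dvd b.toNat b a le_rfl (by omega)).2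

lemma pvGcd_le_left {a b : Int} (ha : 1 ≤ a) (hb : 0 ≤ b) : pvGcd a b ≤ a :=
  Int.le_of_dvd (by omega) (pvGcd_dvd b.toNat b a le_rfl hb).1

-- loop invariants for pvBest
lemma pvInner_le (a : Int) : ∀ (Bs : List Int) (acc : Int), acc ≤ pvInner a Bs acc := by
  intro Bs
  induction Bs with
  | nil => intro acc; exact le_refl _
  | cons b t ih =>
    intro acc
    rw [pvInner]
    by_cases hb : b ≤ acc
    · rw [if_pos hb]
    · rw [if_neg hb]
      refine le_trans ?_ (ih _)
      split_ifs <;> omega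

lemma pvInner_cases (a : Int) :
    ∀ (Bs : List Int) (acc : Int), pvInner a Bs acc = acc ∨
      ∃ b ∈ Bs, pvInner a Bs acc = pvGcd a b := by
  intro Bs
  induction Bs with
  | nil => intro acc; left; rfl
  | cons b t ih =>
    intro acc
    rw [pvInner]
    by_cases hb : b ≤ acc
    · rw [if_pos hb]; left; rfl
    · rw [if_neg hb]
      rcases ih (if acc < pvGcd a b then pvGcd a b else acc) with h | ⟨b', hb', h⟩
      · rw [h]
        by_cases hgt : acc < pvGcd a b
        · rw [if_pos hgt]; right; exact ⟨b, by simp, rfl⟩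
        · rw [if_neg hgt]; left; rfl
      · right; exact ⟨b', by simp [hb'], h⟩

lemma pvInner_ub (a : Int) (ha : 1 ≤ a) :
    ∀ (Bs : List Int), Bs.Pairwise (fun x y => y ≤ x) →
      ∀ (acc b : Int), b ∈ Bs → 1 ≤ b → pvGcd a b ≤ pvInner a Bs acc := by
  intro Bs
  induction Bs with
  | nil => intro _ acc b hmem; exact absurd hmem (List.not_mem_nil)
  | cons c t ih =>
    intro hpw acc b hmem hb
    obtain ⟨hct, hpt⟩ := List.pairwise_cons.1 hpw
    rw [pvInner]
    rcases List.mem_cons.1 hmem with rfl | hmem'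
    · by_cases hc : b ≤ acc
      · rw [if_pos hc]; exact le_trans (pvGcd_le_right hb) hc
      · rw [if_neg hc]
        refine le_trans ?_ (pvInner_le a t _)
        split_ifs <;> omega
    · by_cases hc : c ≤ acc
      · rw [if_pos hc]; exact le_trans (pvGcd_le_right hb) (le_trans (hct b hmem') hc)
      · rw [if_neg hc]; exact ih hpt _ b hmem' hb

lemma pvOuterF_le (Bs : List Int) (acc a : Int) : acc ≤ pvOuterF Bs acc a := by
  unfold pvOuterF
  split_ifs
  · exact pvInner_le a Bs acc
  · exact le_refl _

lemma pvBest_le : ∀ (A Bs : List Int) (acc : Int), acc ≤ A.foldl (pvOuterF Bs) acc := by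
  intro A
  induction A with
  | nil => intro Bs acc; exact le_refl _
  | cons a t ih => intro Bs acc; exact le_trans (pvOuterF_le Bs acc a) (ih _ _)

lemma pvBest_cases :
    ∀ (A Bs : List Int) (acc : Int), 0 ≤ acc → (A.foldl (pvOuterF Bs) acc = acc ∨
      ∃ a ∈ A, 1 ≤ a ∧ ∃ b ∈ Bs, A.foldl (pvOuterF Bs) acc = pvGcd a b) := by
  intro A
  induction A with
  | nil => intro Bs acc _; left; rfl
  | cons a t ih =>
    intro Bs acc hacc
    simp only [List.foldl_cons]
    rcases ih Bs (pvOuterF Bs acc a) (le_trans hacc (pvOuterF_le Bs acc a)) with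
      h | ⟨a', ha', h1, b', hb', h2⟩
    · rw [h]
      unfold pvOuterF
      split_ifs with hlt
      · rcases pvInner_cases a Bs acc with h2 | ⟨b', hb', h2⟩
        · left; exact h2
        · right; exact ⟨a, by simp, by omega, b', hb', h2⟩
      · left; rfl
    · right; exact ⟨a', by simp [ha'], h1, b', hb', h2⟩

lemma pvBest_ub :
    ∀ (A Bs : List Int) (acc a b : Int), Bs.Pairwise (fun x y => y ≤ x) →
      a ∈ A → b ∈ Bs → 1 ≤ a → 1 ≤ b →
      pvGcd a b ≤ A.foldl (pvOuterF Bs) acc := by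
  intro A
  induction A with
  | nil => intro Bs acc a b _ hmem; exact absurd hmem (List.not_mem_nil)
  | cons c t ih =>
    intro Bs acc a b hpw hmem hbmem ha hb
    simp only [List.foldl_cons]
    rcases List.mem_cons.1 hmem with rfl | hmem'
    · refine le_trans ?_ (pvBest_le t Bs (pvOuterF Bs acc a))
      unfold pvOuterF
      split_ifs with hlt
      · exact pvInner_ub a ha Bs hpw acc b hbmem hb
      · exact le_trans (pvGcd_le_left ha (by omega)) (by omega)
    · exact ih Bs _ a b hpw hmem' hbmem ha hb

-- any multiple of g among the list values is at most g * (hv // g)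
lemma le_top_multiple {g a hv : Int} (hg : 1 ≤ g) (hdvd : g ∣ a) (hle : a ≤ hv) :
    a ≤ g * PySem.Int.floordiv hv g := by
  rcases hdvd with ⟨k, rfl⟩
  have hk : k ≤ PySem.Int.floordiv hv g :=
    (PySem.Int.le_floordiv_iff_mul_le (by omega)).2 (by nlinarith)
  nlinarith

-- pvTopMul S best is the IsHit value at the top scan point
lemma pvTopMul_isHit {S : List Int} {best x hv : Int} (hb : 1 ≤ best)
    (hx : x = best * PySem.Int.floordiv hv best)
    (hub : ∀ a ∈ S, a ≤ hv)
    (hex : ∃ a ∈ S, 1 ≤ a ∧ best ∣ a) :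
    IsHit S best x (pvTopMul S best) ∧ 1 ≤ pvTopMul S best := by
  obtain ⟨a0, ha0S, ha01, ha0d⟩ := hex
  set L := S.filter (fun x => decide (1 ≤ x) && decide (PySem.Int.mod x best = 0)) with hL
  have ha0L : a0 ∈ L := by
    rw [hL, List.mem_filter]
    exact ⟨ha0S, by simp [ha01, (PySem.Int.mod_eq_zero_iff_dvd a0 best).2 ha0d]⟩
  have hLne : L ≠ [] := fun h => by simp [h] at ha0L
  obtain ⟨μ, hμ⟩ : ∃ μ, PySem.List.max? L (fun y => y) = some μ := by
    cases h : PySem.List.max? L (fun y => y) with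
    | none => exact absurd ((PySem.List.max?_eq_none_iff L (fun y => y)).1 h) hLne
    | some μ => exact ⟨μ, rfl⟩
  have hμL := PySem.List.max?_mem hμ
  rw [hL, List.mem_filter] at hμL
  obtain ⟨hμS, hμp⟩ := hμL
  have hμp' : 1 ≤ μ ∧ PySem.Int.mod μ best = 0 := by simpa using hμp
  have hμ1 : 1 ≤ μ := hμp'.1
  have hμd : best ∣ μ := (PySem.Int.mod_eq_zero_iff_dvd μ best).1 hμp'.2
  have heq : pvTopMul S best = μ := by rw [pvTopMul, ← hL, hμ]; rfl
  have hub' : ∀ a, Qual S best x a → a ≤ μ := by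
    rintro a ⟨haS, ha1, hax, had⟩
    have haL : a ∈ L := by
      rw [hL, List.mem_filter]
      exact ⟨haS, by simp [ha1, (PySem.Int.mod_eq_zero_iff_dvd a best).2 had]⟩
    exact PySem.List.max?_isMax hμ a haL
  rw [heq]
  refine ⟨Or.inr ⟨⟨hμS, hμ1, ?_, hμd⟩, hub'⟩, hμ1⟩
  rw [hx]
  exact le_top_multiple hb hμd (hub μ hμS)

theorem maximumGcdAndSum_spec : Claim_equal_maximumGcdAndSum := by
  intro A B _ hpre
  obtain ⟨⟨a₁, ha₁A, ha₁1⟩, ⟨b₁, hb₁B, hb₁1⟩⟩ := hpre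
  -- max(A), max(B)
  obtain ⟨maxA, hA⟩ : ∃ v, PySem.List.max? A (fun y => y) = some v := by
    cases h : PySem.List.max? A (fun y => y) with
    | none =>
      rw [PySem.List.max?_eq_none_iff A (fun y => y)] at h
      subst h; exact absurd ha₁A (List.not_mem_nil)
    | some v => exact ⟨v, rfl⟩
  obtain ⟨maxB, hB⟩ : ∃ v, PySem.List.max? B (fun y => y) = some v := by
    cases h : PySem.List.max? B (fun y => y) with
    | none =>
      rw [PySem.List.max?_eq_none_iff B (fun y => y)] at h
      subst h; exact absurd hb₁B (List.not_mem_nil)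
    | some v => exact ⟨v, rfl⟩
  have hubA : ∀ a ∈ A, a ≤ maxA := PySem.List.max?_isMax hA
  have hubB : ∀ b ∈ B, b ≤ maxB := PySem.List.max?_isMax hB
  have hmaxA1 : 1 ≤ maxA := le_trans ha₁1 (hubA a₁ ha₁A)
  have hmaxB1 : 1 ≤ maxB := le_trans hb₁1 (hubB b₁ hb₁B)
  -- the sorted positive part of B that Source B's inner loop walks
  set BS := PySem.List.sorted (B.filter (fun b => decide (1 ≤ b))) (fun x => x) true with hBS
  have hmemBS : ∀ x : Int, x ∈ BS ↔ x ∈ B ∧ 1 ≤ x := by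
    intro x
    rw [hBS, PySem.List.mem_sorted, List.mem_filter]
    simp
  have hpw : BS.Pairwise (fun x y : Int => y ≤ x) := by
    rw [hBS]
    simpa using PySem.List.sorted_pairwise_rev
      (xs := B.filter (fun b => decide (1 ≤ b))) (key := fun x : Int => x)
  -- best = pvBest A BS and its properties
  have hbest1 : 1 ≤ pvBest A BS := by
    have h1 := pvGcd_pos b₁.toNat b₁ a₁ le_rfl ha₁1 (by omega)
    have h2 := pvBest_ub A BS 0 a₁ b₁ hpw ha₁A ((hmemBS b₁).2 ⟨hb₁B, hb₁1⟩) ha₁1 hb₁1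
    unfold pvBest; omega
  obtain ⟨a0, ha0A, ha01, b0, hb0BS, hbeq⟩ :
      ∃ a ∈ A, 1 ≤ a ∧ ∃ b ∈ BS, pvBest A BS = pvGcd a b := by
    rcases pvBest_cases A BS 0 le_rfl with h | h
    · unfold pvBest at hbest1; omega
    · exact h
  obtain ⟨hb0B, hb01⟩ := (hmemBS b0).1 hb0BS
  have hdvd0 := pvGcd_dvd b0.toNat b0 a0 le_rfl (by omega)
  have hdvdA : pvBest A BS ∣ a0 := hbeq ▸ hdvd0.1
  have hdvdB : pvBest A BS ∣ b0 := hbeq ▸ hdvd0.2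
  have hbestA : pvBest A BS ≤ maxA :=
    le_trans (Int.le_of_dvd (by omega) hdvdA) (hubA a0 ha0A)
  have hbestB : pvBest A BS ≤ maxB :=
    le_trans (Int.le_of_dvd (by omega) hdvdB) (hubB b0 hb0B)
  have hexA : ∃ a ∈ A, 1 ≤ a ∧ pvBest A BS ∣ a := ⟨a0, ha0A, ha01, hdvdA⟩
  have hexB : ∃ b ∈ B, 1 ≤ b ∧ pvBest A BS ∣ b := ⟨b0, hb0B, hb01, hdvdB⟩
  have hmax : ∀ g : Int, 1 ≤ g → (∃ a ∈ A, 1 ≤ a ∧ g ∣ a) → (∃ b ∈ B, 1 ≤ b ∧ g ∣ b) →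
      g ≤ pvBest A BS := by
    rintro g hg ⟨a, haA, ha1, had⟩ ⟨b, hbB, hb1, hbd⟩
    have h1 : g ∣ pvGcd a b := dvd_pvGcd b.toNat b a g le_rfl had hbd
    have h2 : 1 ≤ pvGcd a b := pvGcd_pos b.toNat b a le_rfl ha1 (by omega)
    have h3 : g ≤ pvGcd a b := Int.le_of_dvd (by omega) h1
    have h4 := pvBest_ub A BS 0 a b hpw haA ((hmemBS b).2 ⟨hbB, hb1⟩) ha1 hb1
    unfold pvBest; omega
  -- hit characterisations at the top scan point
  have hvubA : ∀ a ∈ A, a ≤ max maxA maxB := fun a ha => le_trans (hubA a ha) (le_max_left _ _)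
  have hvubB : ∀ b ∈ B, b ≤ max maxA maxB := fun b hb => le_trans (hubB b hb) (le_max_right _ _)
  have hitA := pvTopMul_isHit (S := A) (hv := max maxA maxB) hbest1 rfl hvubA hexA
  have hitB := pvTopMul_isHit (S := B) (hv := max maxA maxB) hbest1 rfl hvubB hexB
  have memAs : ∀ a : Int, a ∈ PySem.Set.ofList A ↔ a ∈ A := fun a => PySem.Set.mem_ofList A a
  have memBs : ∀ b : Int, b ∈ PySem.Set.ofList B ↔ b ∈ B := fun b => PySem.Set.mem_ofList B b
  -- the descending for-loop, from any g ≥ best down to 1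
  have run : ∀ (n : Nat) (g : Int), g = pvBest A BS + n →
      pvOuter (PySem.Set.ofList A) (PySem.Set.ofList B) (max maxA maxB)
        (PySem.List.pyRange g 0 (-1)) = pvTopMul A (pvBest A BS) + pvTopMul B (pvBest A BS) := by
    intro n
    induction n with
    | zero =>
      intro g hgeq
      have hgb : g = pvBest A BS := by omega
      subst hgb
      rw [PySem.List.pyRange_neg_one_cons (by omega : (0:ℤ) < pvBest A BS)]
      simp only [pvOuter]
      have hw := while_spec (PySem.Set.ofList A) (PySem.Set.ofList B) (pvBest A BS) hbest1
        (pvBest A BS * PySem.Int.floordiv (max maxA maxB) (pvBest A BS)).toNat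
        (pvBest A BS * PySem.Int.floordiv (max maxA maxB) (pvBest A BS)) le_rfl
        (dvd_mul_right _ _) 0 0
      have e1 := isHit_unique (isHit_congr memAs (hw.1.1 rfl)) hitA.1
      have e2 := isHit_unique (isHit_congr memBs (hw.2.1 rfl)) hitB.1
      rw [e1, e2, if_pos ⟨by have := hitA.2; omega, by have := hitB.2; omega⟩]
    | succ n ihn =>
      intro g hgeq
      have hg1 : 1 ≤ g := by omega
      rw [PySem.List.pyRange_neg_one_cons (by omega : (0:ℤ) < g)]
      simp only [pvOuter]
      have hw := while_spec (PySem.Set.ofList A) (PySem.Set.ofList B) g hg1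
        (g * PySem.Int.floordiv (max maxA maxB) g).toNat
        (g * PySem.Int.floordiv (max maxA maxB) g) le_rfl
        (dvd_mul_right _ _) 0 0
      have hwA := isHit_congr memAs (hw.1.1 rfl)
      have hwB := isHit_congr memBs (hw.2.1 rfl)
      rw [if_neg ?hcond]
      case hcond =>
        rintro ⟨h1, h2⟩
        rcases hwA with ⟨h0, _⟩ | ⟨hqA, _⟩
        · exact h1 h0
        rcases hwB with ⟨h0, _⟩ | ⟨hqB, _⟩
        · exact h2 h0
        have := hmax g hg1 ⟨_, hqA.1, hqA.2.1, hqA.2.2.2⟩ ⟨_, hqB.1, hqB.2.1, hqB.2.2.2⟩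
        omega
      exact ihn (g - 1) (by omega)
  -- assemble
  show maximumGcdAndSum A B = maximumGcdAndSum_alt A B
  have hLHS : maximumGcdAndSum A B =
      pvOuter (PySem.Set.ofList A) (PySem.Set.ofList B) (max maxA maxB)
        (PySem.List.pyRange (min maxA maxB) 0 (-1)) := by
    simp only [maximumGcdAndSum]
    rw [hA, hB]
    rfl
  have hRHS : maximumGcdAndSum_alt A B = pvTopMul A (pvBest A BS) + pvTopMul B (pvBest A BS) := by
    simp only [maximumGcdAndSum_alt]
    rw [← hBS, if_neg (by omega : ¬ pvBest A BS = 0)]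
  rw [hLHS, hRHS]
  exact run (min maxA maxB - pvBest A BS).toNat (min maxA maxB) (by omega)
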